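-- pv_equiv track=rewrite | github.com/EduardoSP/Talleres-Similacion-computacional | Taller2/Punto2 Pruebas de bondad/3.1Pruebas de serie de 3 dimensiones/serie3dimensione.py | Write_classes_table
-- ===== SOURCE A (Python) =====
-- def Write_classes_table(intervals_group, table):
-- 	intervals_group += 1 # begin in 1 the interval
-- 	cont = 0
-- 	for i in range(1, intervals_group):
-- 		for j in range(1, intervals_group):
-- 			for k in range(1, intervals_group):
-- 				table[cont][0] = str(i) +"-"+str(j)+"-"+str(k)
-- 				cont +=1
-- 	return table
-- ===== SOURCE B (Python) =====
-- def Write_classes_table(intervals_group, table):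
--     n = intervals_group
--     for cont in range(n ** 3):
--         i = cont // (n * n) + 1
--         j = (cont // n) % n + 1
--         k = cont % n + 1
--         table[cont][0] = str(i) + "-" + str(j) + "-" + str(k)
--     return table
-- ===== Notes on version B (the rewrite author's own statement) =====
-- stated objective: alternative
-- what changed: replaces the three nested loops and running counter by a single flat loop over range(n**3) that reconstructs each (i,j,k) label from the counter with base-n div/mod arithmetic
import Mathlib
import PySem

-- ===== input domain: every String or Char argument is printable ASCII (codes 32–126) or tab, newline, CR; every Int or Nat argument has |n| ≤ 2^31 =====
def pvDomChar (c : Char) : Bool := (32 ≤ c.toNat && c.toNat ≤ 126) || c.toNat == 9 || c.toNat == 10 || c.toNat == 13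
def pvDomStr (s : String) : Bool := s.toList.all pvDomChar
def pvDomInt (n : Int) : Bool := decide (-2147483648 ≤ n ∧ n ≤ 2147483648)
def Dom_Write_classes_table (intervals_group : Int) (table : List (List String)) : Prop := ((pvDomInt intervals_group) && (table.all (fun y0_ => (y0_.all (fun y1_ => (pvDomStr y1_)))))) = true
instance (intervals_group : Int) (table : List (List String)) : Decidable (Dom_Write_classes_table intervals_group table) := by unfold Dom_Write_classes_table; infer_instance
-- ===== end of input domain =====

-- B replaces A's three nested loops and running counter by one flat loop over range(n**3) with
-- base-n div/mod index arithmetic (same cost, different decomposition). Both A and B mutate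
-- `table` in place in Python in exactly the same way; the equivalence proved here is about the
-- returned value (which is the mutated table itself in both).


-- ===== PORT A =====
-- shared cell write: `table[cont][0] = s` (total forms; Pre_ keeps the indices in range)
def pvWrite (t : List (List String)) (c : Int) (s : String) : List (List String) :=
  PySem.List.pySetD t c (PySem.List.pySetD (PySem.List.pyGetD t c []) 0 s)

-- shared label: `str(i) + "-" + str(j) + "-" + str(k)`
def pvLbl (i j k : Int) : String :=
  PySem.Int.toStr i ++ "-" ++ PySem.Int.toStr j ++ "-" ++ PySem.Int.toStr k

def Write_classes_table (intervals_group : Int) (table : List (List String)) : List (List String) :=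
  let ig := intervals_group + 1
  let st := (PySem.List.pyRange 1 ig 1).foldl (fun st i =>
    (PySem.List.pyRange 1 ig 1).foldl (fun st j =>
      (PySem.List.pyRange 1 ig 1).foldl (fun (st : List (List String) × Int) k =>
        (pvWrite st.1 st.2 (pvLbl i j k), st.2 + 1)) st) st) (table, 0)
  st.1

-- ===== PORT B =====
def Write_classes_table_alt (intervals_group : Int) (table : List (List String)) : List (List String) :=
  (PySem.List.pyRange 0 (intervals_group ^ 3) 1).foldl (fun t cont =>
    pvWrite t cont (pvLbl
      (PySem.Int.floordiv cont (intervals_group * intervals_group) + 1)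
      (PySem.Int.mod (PySem.Int.floordiv cont intervals_group) intervals_group + 1)
      (PySem.Int.mod cont intervals_group + 1))) table

-- ===== PRECONDITION & SPEC =====
-- Exactly the inputs where Python A returns normally: it assigns table[cont][0] for every
-- cont < n^3, so the first n^3 rows must exist and be non-empty (else IndexError).
def Pre_Write_classes_table (intervals_group : Int) (table : List (List String)) : Prop :=
  intervals_group.toNat ^ 3 ≤ table.length ∧
    ∀ row ∈ table.take (intervals_group.toNat ^ 3), row ≠ []
instance (intervals_group : Int) (table : List (List String)) : Decidable (Pre_Write_classes_table intervals_group table) := by unfold Pre_Write_classes_table; infer_instance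

def pvWitness_Write_classes_table : Int × List (List String) :=
  (2, [["a"], ["b"], ["c"], ["d"], ["e"], ["f"], ["g"], ["h"]])

def Spec_Write_classes_table (intervals_group : Int) (table : List (List String)) (out : List (List String)) : Prop := out = Write_classes_table_alt intervals_group table
instance (intervals_group : Int) (table : List (List String)) (out : List (List String)) : Decidable (Spec_Write_classes_table intervals_group table out) := by unfold Spec_Write_classes_table; infer_instance

-- ===== CLAIM (what is proved, stated in full; the proofs are below) =====
def Claim_equal_Write_classes_table : Prop := ∀ (intervals_group : Int) (table : List (List String)), Dom_Write_classes_table intervals_group table → Pre_Write_classes_table intervals_group table → Spec_Write_classes_table intervals_group table (Write_classes_table intervals_group table)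

-- ===== LEMMAS AND PROOFS =====

-- the common write step, on a (table, counter) state
def pvStep (st : List (List String) × Int) (s : String) : List (List String) × Int :=
  (pvWrite st.1 st.2 s, st.2 + 1)

-- a loop of loops over pvStep is pvStep over the concatenation
theorem pv_foldl_flat (g : Int → List String) (r : List Int) (st : List (List String) × Int) :
    r.foldl (fun st x => (g x).foldl pvStep st) st = (r.flatMap g).foldl pvStep st := by
  induction r generalizing st with
  | nil => rfl
  | cons x r ih => simp [List.flatMap_cons, List.foldl_append, ih]

-- B's flat loop carries its own index; it equals the counter-state loop started at the same index
theorem pv_foldl_counter (f : Int → String) (k : Nat) :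
    ∀ (a : Int) (t : List (List String)),
      (PySem.List.pyRange a (a + (k : Int)) 1).foldl (fun t c => pvWrite t c (f c)) t
        = (((PySem.List.pyRange a (a + (k : Int)) 1).map f).foldl pvStep (t, a)).1 := by
  induction k with
  | zero =>
    intro a t
    rw [PySem.List.pyRange_one_eq_nil (by omega)]
    rfl
  | succ k ih =>
    intro a t
    have hcast : a + ((k + 1 : Nat) : Int) = (a + 1) + (k : Int) := by push_cast; ring
    rw [hcast, PySem.List.pyRange_one_cons (by omega)]
    simp only [List.foldl_cons, List.map_cons]
    have hstep : pvStep (t, a) (f a) = (pvWrite t a (f a), a + 1) := rfl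
    rw [hstep]
    exact ih (a + 1) (pvWrite t a (f a))

-- base-n enumeration of a product range
theorem pv_range_mul (a b : Nat) :
    List.range (a * b) = (List.range a).flatMap (fun i => (List.range b).map (fun j => i * b + j)) := by
  induction a with
  | zero => simp
  | succ a ih =>
    rw [Nat.succ_mul, List.range_add, ih, List.range_succ, List.flatMap_append]
    simp

-- the arithmetic core: B's div/mod reconstruction of the (i, j, k) coordinates
theorem pv_lbl_eq (m i j k : Nat) (hj : j < m) (hk : k < m) :
    pvLbl (PySem.Int.floordiv ((i * (m * m) + (j * m + k) : Nat) : Int) ((m : Int) * (m : Int)) + 1)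
          (PySem.Int.mod (PySem.Int.floordiv ((i * (m * m) + (j * m + k) : Nat) : Int) (m : Int)) (m : Int) + 1)
          (PySem.Int.mod ((i * (m * m) + (j * m + k) : Nat) : Int) (m : Int) + 1)
      = pvLbl (1 + (i : Int)) (1 + (j : Int)) (1 + (k : Int)) := by
  have hm : 0 < m := Nat.lt_of_le_of_lt (Nat.zero_le k) hk
  have hr : j * m + k < m * m := by
    have h1 : j * m + k < (j + 1) * m := by
      have h := Nat.succ_mul j m
      calc j * m + k < j * m + m := by omega
        _ = (j + 1) * m := by ring
    have h2 : (j + 1) * m ≤ m * m := Nat.mul_le_mul_right m hj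
    omega
  have hdiv1 : (i * (m * m) + (j * m + k)) / (m * m) = i := by
    rw [Nat.add_comm, Nat.add_mul_div_right _ _ (Nat.mul_pos hm hm), Nat.div_eq_of_lt hr, Nat.zero_add]
  have hc : i * (m * m) + (j * m + k) = k + (i * m + j) * m := by ring
  have hdiv2 : (i * (m * m) + (j * m + k)) / m = i * m + j := by
    rw [hc, Nat.add_mul_div_right _ _ hm, Nat.div_eq_of_lt hk, Nat.zero_add]
  have hmod2 : (i * m + j) % m = j := by
    rw [Nat.add_comm, Nat.add_mul_mod_self_right, Nat.mod_eq_of_lt hj]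
  have hmod1 : (i * (m * m) + (j * m + k)) % m = k := by
    rw [hc, Nat.add_mul_mod_self_right, Nat.mod_eq_of_lt hk]
  have hmm : ((m : Int) * (m : Int)) = ((m * m : Nat) : Int) := by push_cast; ring
  rw [hmm]
  simp only [PySem.Int.floordiv_natCast, PySem.Int.mod_natCast, hdiv1, hdiv2, hmod1, hmod2]
  unfold pvLbl
  norm_num [Int.add_comm]

-- A's nested loops are the flat-list fold of pvStep over the concatenated label list
theorem pvA_eq (r : List Int) (st : List (List String) × Int) :
    r.foldl (fun st i => r.foldl (fun st j =>
        r.foldl (fun (st : List (List String) × Int) k =>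
          (pvWrite st.1 st.2 (pvLbl i j k), st.2 + 1)) st) st) st
      = ((r.flatMap (fun i => r.flatMap (fun j => r.map (fun k => pvLbl i j k)))).foldl pvStep st) := by
  have h1 : (fun (st : List (List String) × Int) i => r.foldl (fun st j =>
        r.foldl (fun (st : List (List String) × Int) k =>
          (pvWrite st.1 st.2 (pvLbl i j k), st.2 + 1)) st) st)
      = (fun st i => ((r.flatMap fun j => r.map (pvLbl i j)).foldl pvStep st)) := by
    funext st i
    rw [← pv_foldl_flat]
    congr 1
    funext st j
    rw [List.foldl_map]
    rfl
  rw [h1, pv_foldl_flat]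

-- the two label lists coincide
theorem pv_lists_eq (m : Nat) :
    ((PySem.List.pyRange 0 (0 + ((m ^ 3 : Nat) : Int)) 1).map (fun c => pvLbl
        (PySem.Int.floordiv c ((m : Int) * (m : Int)) + 1)
        (PySem.Int.mod (PySem.Int.floordiv c (m : Int)) (m : Int) + 1)
        (PySem.Int.mod c (m : Int) + 1)))
      = ((PySem.List.pyRange 1 ((m : Int) + 1) 1).flatMap (fun i =>
          (PySem.List.pyRange 1 ((m : Int) + 1) 1).flatMap (fun j =>
            (PySem.List.pyRange 1 ((m : Int) + 1) 1).map (fun k => pvLbl i j k)))) := by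
  rw [PySem.List.pyRange_one 0, PySem.List.pyRange_one 1]
  have e1 : ((0 + ((m ^ 3 : Nat) : Int)) - 0).toNat = m ^ 3 := by
    rw [zero_add, sub_zero, Int.toNat_natCast]
  have e2 : (((m : Int) + 1) - 1).toNat = m := by omega
  rw [e1, e2]
  have e3 : m ^ 3 = m * (m * m) := by ring
  rw [e3, pv_range_mul m (m * m)]
  simp only [List.map_map, List.flatMap_map, List.map_flatMap]
  apply List.flatMap_congr
  intro i _
  rw [pv_range_mul m m]
  simp only [List.map_flatMap]
  apply List.flatMap_congr
  intro j hj
  simp only [List.map_map]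
  apply List.map_congr_left
  intro k hk
  simp only [List.mem_range] at hj hk
  simp only [Function.comp_apply]
  have h := pv_lbl_eq m i j k hj hk
  push_cast at h ⊢
  rw [zero_add]
  exact h

-- ===== VERDICT (by name: the statement is the Claim_ definition above) =====
theorem Write_classes_table_spec : Claim_equal_Write_classes_table := by
  unfold Claim_equal_Write_classes_table
  intro n table _ _
  unfold Spec_Write_classes_table Write_classes_table Write_classes_table_alt
  dsimp only
  by_cases hn : 0 ≤ n
  · obtain ⟨m, rfl⟩ := Int.eq_ofNat_of_zero_le hn
    rw [pvA_eq]
    have e0 : ((m : Int)) ^ 3 = 0 + ((m ^ 3 : Nat) : Int) := by push_cast; ring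
    rw [e0, pv_foldl_counter _ (m ^ 3) 0 table, pv_lists_eq]
  · rw [PySem.List.pyRange_one_eq_nil (by omega : (n + 1 : Int) ≤ 1)]
    have h3 : n ^ 3 ≤ 0 := by nlinarith [sq_nonneg n]
    rw [PySem.List.pyRange_one_eq_nil (by omega : n ^ 3 ≤ 0)]
    rfl
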